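-- pv_equiv track=rewrite | github.com/amruthkumarn/infa2spark | src/core/mapping_dag_processor.py | _determine_phase_type
-- ===== SOURCE A (Python) =====
-- from typing import Dict, List, Set, Tuple, Optional
--
-- def _determine_phase_type(group: List[str], sources: List[str],
--                          transformations: List[str], targets: List[str]) -> str:
--     """Determine the type of execution phase"""
--     if all(comp in sources for comp in group):
--         return 'source_phase'
--     elif all(comp in targets for comp in group):
--         return 'target_phase'
--     elif all(comp in transformations for comp in group):
--         return 'transformation_phase'
--     else:
--         return 'mixed_phase'
-- ===== SOURCE B (Python) =====
-- def _determine_phase_type(group, sources, transformations, targets):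
--     """Determine the type of execution phase"""
--     in_src = in_tgt = in_tr = True
--     for comp in group:
--         if in_src and comp not in sources:
--             in_src = False
--         if in_tgt and comp not in targets:
--             in_tgt = False
--         if in_tr and comp not in transformations:
--             in_tr = False
--         if not (in_src or in_tgt or in_tr):
--             break
--     if in_src:
--         return 'source_phase'
--     if in_tgt:
--         return 'target_phase'
--     if in_tr:
--         return 'transformation_phase'
--     return 'mixed_phase'
-- ===== Notes on version B (the rewrite author's own statement) =====
-- stated objective: alternative
-- what changed: Three separate all(...) membership scans over group are replaced by a single pass over group maintaining three boolean flags with an early break once all flags are False; classification reads the flags afterwards.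
import Mathlib
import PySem

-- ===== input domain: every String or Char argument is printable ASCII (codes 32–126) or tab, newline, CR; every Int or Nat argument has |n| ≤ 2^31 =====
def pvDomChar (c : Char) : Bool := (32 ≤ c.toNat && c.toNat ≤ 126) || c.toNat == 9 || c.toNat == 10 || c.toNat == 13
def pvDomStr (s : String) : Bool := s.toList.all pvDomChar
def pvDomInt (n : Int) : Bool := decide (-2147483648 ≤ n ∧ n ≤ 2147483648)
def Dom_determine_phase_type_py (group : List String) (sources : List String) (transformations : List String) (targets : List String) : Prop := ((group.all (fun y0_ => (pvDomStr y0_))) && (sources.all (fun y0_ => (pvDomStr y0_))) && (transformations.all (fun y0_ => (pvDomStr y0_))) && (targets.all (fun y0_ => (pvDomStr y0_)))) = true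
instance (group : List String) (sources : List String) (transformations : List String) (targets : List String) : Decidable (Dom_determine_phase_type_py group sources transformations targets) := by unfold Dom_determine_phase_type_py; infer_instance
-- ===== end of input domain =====

-- ===== PORT A =====
def determine_phase_type_py (group : List String) (sources : List String) (transformations : List String) (targets : List String) : String :=
  if group.all (fun comp => sources.contains comp) then "source_phase"
  else if group.all (fun comp => targets.contains comp) then "target_phase"
  else if group.all (fun comp => transformations.contains comp) then "transformation_phase"
  else "mixed_phase"

-- ===== PORT B =====
-- B: one pass over group with three boolean flags and early exit (alternative decomposition).
-- single loop over group: flags (in_src, in_tgt, in_tr), early break when all False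
def phaseLoop (sources targets transformations : List String) :
    List String → Bool → Bool → Bool → Bool × Bool × Bool
  | [], s, t, r => (s, t, r)
  | comp :: rest, s, t, r =>
    let s' := s && sources.contains comp
    let t' := t && targets.contains comp
    let r' := r && transformations.contains comp
    if !(s' || t' || r') then (s', t', r')
    else phaseLoop sources targets transformations rest s' t' r'

def determine_phase_type_py_alt (group : List String) (sources : List String) (transformations : List String) (targets : List String) : String :=
  match phaseLoop sources targets transformations group true true true with
  | (s, t, r) =>
    if s then "source_phase"
    else if t then "target_phase"
    else if r then "transformation_phase"
    else "mixed_phase"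

-- ===== PRECONDITION & SPEC =====
def Spec_determine_phase_type_py (group : List String) (sources : List String) (transformations : List String) (targets : List String) (out : String) : Prop := out = determine_phase_type_py_alt group sources transformations targets
instance (group : List String) (sources : List String) (transformations : List String) (targets : List String) (out : String) : Decidable (Spec_determine_phase_type_py group sources transformations targets out) := by unfold Spec_determine_phase_type_py; infer_instance

-- ===== CLAIM (what is proved, stated in full; the proofs are below) =====
def Claim_equal_determine_phase_type_py : Prop := ∀ (group : List String) (sources : List String) (transformations : List String) (targets : List String), Dom_determine_phase_type_py group sources transformations targets → Spec_determine_phase_type_py group sources transformations targets (determine_phase_type_py group sources transformations targets)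

-- ===== LEMMAS AND PROOFS =====

-- ===== VERDICT (by name: the statement is the Claim_ definition above) =====
theorem phaseLoop_eq (sources targets transformations : List String) :
    ∀ (group : List String) (s t r : Bool),
      phaseLoop sources targets transformations group s t r =
        (s && group.all (fun c => sources.contains c),
         t && group.all (fun c => targets.contains c),
         r && group.all (fun c => transformations.contains c)) := by
  intro group
  induction group with
  | nil => intro s t r; simp [phaseLoop]
  | cons c rest ih =>
    intro s t r
    simp only [phaseLoop, List.all_cons]
    split
    · rename_i h
      simp only [Bool.not_eq_true', Bool.or_eq_false_iff] at h
      obtain ⟨⟨hs, ht⟩, hr⟩ := h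
      have e : ∀ (x y z : Bool), (x && y) = false → (x && (y && z)) = false := by decide
      simp only [Prod.mk.injEq]
      exact ⟨by rw [hs, (e _ _ _ hs).symm], by rw [ht, (e _ _ _ ht).symm], by rw [hr, (e _ _ _ hr).symm]⟩
    · rw [ih]
      simp [Bool.and_assoc]

theorem determine_phase_type_py_spec : Claim_equal_determine_phase_type_py := by
  intro group sources transformations targets _
  unfold Spec_determine_phase_type_py determine_phase_type_py determine_phase_type_py_alt
  rw [phaseLoop_eq]
  simp
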